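-- pv_equiv track=rewrite | github.com/EricSimoKouche/LINFO1113 | Week 3/e1-1_number_representation/student.py | encode_int8
-- ===== SOURCE A (Python) =====
-- def encode_int8(x):
--     # This function must encode the input integer "x" using the *signed*
--     # integer with 8 bits (uint8) binary representation.
--     #
--     # The output must be a string with the following format:
--     # "XXXXXXXX", where the Xs are replaced by 0 or 1. If the input
--     # integer can't be represented, leave it as "XXXXXXXX".
--
--     # TODO
--     MAX, MIN = 127, -128
--
--     if x < MIN or x > MAX:
--         return 'XXXXXXXX'
--
--     result = ['0', '0', '0', '0', '0', '0', '0', '0']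
--     if x < 0 :
--         result[0] = '1'
--         x = 128 + x
--
--     for i in range(7, 0, -1):
--         bit = x % 2
--         x = x // 2
--         result[i] = str(bit)
--
--     return ''.join(result)
-- ===== SOURCE B (Python) =====
-- def encode_int8(x):
--     if x < -128 or x > 127:
--         return 'XXXXXXXX'
--     return format(x & 0xFF, '08b')
-- ===== Notes on version B (the rewrite author's own statement) =====
-- stated objective: idiomatic
-- what changed: Replaces the sign branch plus bit-extraction loop over a mutable eight-slot list with a single closed-form zero-padded binary format of the masked low byte.
import Mathlib
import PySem

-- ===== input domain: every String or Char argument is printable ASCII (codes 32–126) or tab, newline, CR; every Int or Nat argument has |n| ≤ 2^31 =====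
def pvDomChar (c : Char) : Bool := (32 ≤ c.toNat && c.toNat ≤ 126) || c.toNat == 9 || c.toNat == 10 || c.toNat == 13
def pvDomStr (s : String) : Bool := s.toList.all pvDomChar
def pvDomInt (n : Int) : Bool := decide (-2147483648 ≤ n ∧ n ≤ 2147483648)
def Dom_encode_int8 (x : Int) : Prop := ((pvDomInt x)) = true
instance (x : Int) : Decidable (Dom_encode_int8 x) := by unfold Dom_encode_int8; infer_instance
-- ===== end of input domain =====

-- B replaces A's sign branch and bit-extraction loop by the closed-form masked format
-- format(x & 0xFF, '08b'); return values are identical for every integer input (idiomatic).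

-- ===== PORT A =====
-- literal port: result is the mutable list of one-char strings, joined at the end;
-- the loop index i runs 7,6,…,1 and is always in range, so .toNat is exact here
def encode_int8 (x : Int) : String :=
  if x < -128 ∨ x > 127 then "XXXXXXXX"
  else
    let result : List String := ["0","0","0","0","0","0","0","0"]
    let (result, x) := if x < 0 then (result.set 0 "1", 128 + x) else (result, x)
    let st := (PySem.List.pyRange 7 0 (-1)).foldl
      (fun (st : List String × Int) i =>
        let bit := PySem.Int.mod st.2 2
        let x' := PySem.Int.floordiv st.2 2
        (st.1.set i.toNat (PySem.Int.toStr bit), x')) (result, x)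
    PySem.Str.join "" st.1

-- ===== PORT B =====
-- format(v, '08b') ported as the library binary-digit function Nat.toDigits 2,
-- zero-padded on the left to width 8
def encode_int8_alt (x : Int) : String :=
  if x < -128 ∨ x > 127 then "XXXXXXXX"
  else
    let bits := Nat.toDigits 2 (PySem.Int.band x 255).toNat
    String.ofList (List.replicate (8 - bits.length) '0' ++ bits)

-- ===== PRECONDITION & SPEC =====
def Spec_encode_int8 (x : Int) (out : String) : Prop := out = encode_int8_alt x
instance (x : Int) (out : String) : Decidable (Spec_encode_int8 x out) := by unfold Spec_encode_int8; infer_instance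

-- ===== CLAIM (what is proved, stated in full; the proofs are below) =====
def Claim_equal_encode_int8 : Prop := ∀ (x : Int), Dom_encode_int8 x → Spec_encode_int8 x (encode_int8 x)

-- ===== LEMMAS AND PROOFS =====
lemma encode_in_range (x : Int) (h0 : -128 ≤ x) (h1 : x ≤ 127) :
    encode_int8 x = encode_int8_alt x := by
  interval_cases x <;> exact String.toList_inj.mp (by decide)

-- ===== VERDICT (by name: the statement is the Claim_ definition above) =====
theorem encode_int8_spec : Claim_equal_encode_int8 := by
  intro x _
  unfold Spec_encode_int8
  by_cases h : x < -128 ∨ x > 127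
  · unfold encode_int8 encode_int8_alt
    rw [if_pos h, if_pos h]
  · push Not at h
    exact encode_in_range x h.1 h.2
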